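-- pv_equiv track=rewrite | github.com/vaishnavkoka/psychology_chatbot_advanced_v2 | psychology_chatbot_advanced/src/data_ingestion.py | _split_document_by_sections
-- ===== SOURCE A (Python) =====
-- from typing import List, Dict, Any, Tuple
--
-- def _split_document_by_sections(content: str) -> List[Tuple[str, str]]:
--     """Split document into sections based on markdown headers"""
--     sections = []
--     lines = content.split('\n')
--
--     current_section = "Introduction"
--     current_content = []
--
--     for line in lines:
--         if line.startswith('# ') or line.startswith('## ') or line.startswith('### '):
--             # Save previous section
--             if current_content:
--                 text = '\n'.join(current_content).strip()
--                 if text: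
--                     sections.append((current_section, text))
--
--             # Start new section
--             current_section = line.lstrip('#').strip()
--             current_content = []
--         else:
--             current_content.append(line)
--
--     # Don't forget final section
--     if current_content:
--         text = '\n'.join(current_content).strip()
--         if text:
--             sections.append((current_section, text))
--
--     return sections if sections else [("Content", content)]
-- ===== SOURCE B (Python) =====
-- from typing import List, Tuple
--
-- def _split_document_by_sections(content: str) -> List[Tuple[str, str]]:
--     """Split document into sections by recursively dividing at the first header line."""
--     def segments(name, lines):
--         # find the first header line; split there and recurse on the remainder
--         for j in range(len(lines)):
--             if lines[j].startswith('# ') or lines[j].startswith('## ') or lines[j].startswith('### '):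
--                 return [(name, lines[:j])] + segments(lines[j].lstrip('#').strip(), lines[j + 1:])
--         return [(name, lines)]
--
--     out = [(name, text) for name, ls in segments("Introduction", content.split('\n'))
--            if (text := '\n'.join(ls).strip())]
--     return out if out else [("Content", content)]
-- ===== Notes on version B (the rewrite author's own statement) =====
-- stated objective: alternative
-- what changed: B replaces A's single accumulating flush-on-header loop by a recursive divide-and-conquer: it searches for the first header line, slices the body before it, recurses on the lines after it to build (name, lines) segments, and a final comprehension joins/strips each segment and filters out empty texts.
import Mathlib
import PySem

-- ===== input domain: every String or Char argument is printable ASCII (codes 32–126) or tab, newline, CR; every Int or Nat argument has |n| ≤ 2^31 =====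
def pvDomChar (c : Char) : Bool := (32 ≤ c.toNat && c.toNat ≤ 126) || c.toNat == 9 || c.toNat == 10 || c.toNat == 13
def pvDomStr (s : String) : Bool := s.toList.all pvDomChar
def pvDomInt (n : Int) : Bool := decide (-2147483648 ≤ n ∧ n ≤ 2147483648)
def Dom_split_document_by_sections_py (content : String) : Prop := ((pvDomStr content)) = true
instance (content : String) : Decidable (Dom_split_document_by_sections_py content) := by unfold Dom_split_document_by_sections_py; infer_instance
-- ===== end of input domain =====

-- ===== PORT A =====
-- One honest line: B splits recursively at the first header line (slice body, recurse on the
-- rest, then render+filter) instead of A's accumulating flush-on-header loop; objective: alternative.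
-- shared helpers: the literal Python expressions both programs contain
def pvIsHeader (line : String) : Bool :=
  PySem.Str.startswith line "# " || PySem.Str.startswith line "## " || PySem.Str.startswith line "### "

-- line.lstrip('#').strip(): lstrip('#') drops exactly the leading '#' characters (hand port, exact)
def pvHeaderName (line : String) : String :=
  PySem.Str.strip (String.ofList (line.toList.dropWhile (fun c => c == '#')))

def pvStepA (st : List (String × String) × String × List String) (line : String) :
    List (String × String) × String × List String :=
  let (sections, cur, curContent) := st
  if pvIsHeader line then
    let sections :=
      if curContent ≠ [] then
        let text := PySem.Str.strip (PySem.Str.join "\n" curContent)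
        if text ≠ "" then sections ++ [(cur, text)] else sections
      else sections
    (sections, pvHeaderName line, [])
  else
    (sections, cur, curContent ++ [line])

def split_document_by_sections_py (content : String) : List (String × String) :=
  let lines := (PySem.Str.split? content "\n").getD []
  let st := lines.foldl pvStepA ([], "Introduction", [])
  let (sections, cur, curContent) := st
  let sections :=
    if curContent ≠ [] then
      let text := PySem.Str.strip (PySem.Str.join "\n" curContent)
      if text ≠ "" then sections ++ [(cur, text)] else sections
    else sections
  if sections ≠ [] then sections else [("Content", content)]

-- ===== PORT B =====
-- segments(name, lines): scan for the first header (findIdx? = the for-range loop with its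
-- early return), slice the body before it, recurse on the lines after it
def pvSegments (name : String) (lines : List String) : List (String × List String) :=
  match h : lines.findIdx? pvIsHeader with
  | some j => (name, lines.take j) :: pvSegments (pvHeaderName lines[j]!) (lines.drop (j + 1))
  | none => [(name, lines)]
termination_by lines.length
decreasing_by
  have hne : lines ≠ [] := by intro he; subst he; simp [List.findIdx?, List.findIdx?.go] at h
  have : 0 < lines.length := List.length_pos_iff.mpr hne
  simp [List.length_drop]; omega

-- render one segment; none when the stripped text is empty (the comprehension's filter)
def pvEmit (seg : String × List String) : Option (String × String) :=
  let text := PySem.Str.strip (PySem.Str.join "\n" seg.2)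
  if text ≠ "" then some (seg.1, text) else none

def split_document_by_sections_py_alt (content : String) : List (String × String) :=
  let segs := pvSegments "Introduction" ((PySem.Str.split? content "\n").getD [])
  let out := segs.filterMap pvEmit
  if out ≠ [] then out else [("Content", content)]

-- ===== PRECONDITION & SPEC =====
def Spec_split_document_by_sections_py (content : String) (out : List (String × String)) : Prop := out = split_document_by_sections_py_alt content
instance (content : String) (out : List (String × String)) : Decidable (Spec_split_document_by_sections_py content out) := by unfold Spec_split_document_by_sections_py; infer_instance

-- ===== CLAIM (what is proved, stated in full; the proofs are below) =====
def Claim_equal_split_document_by_sections_py : Prop := ∀ (content : String), Dom_split_document_by_sections_py content → Spec_split_document_by_sections_py content (split_document_by_sections_py content)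

-- ===== LEMMAS AND PROOFS =====
-- prepend pending lines cc to the first segment of a segment list
def pvConsCC (cc : List String) (segs : List (String × List String)) : List (String × List String) :=
  match segs with
  | (n, ls) :: t => (n, cc ++ ls) :: t
  | [] => []

theorem pvEmit_nil (cur : String) : pvEmit (cur, []) = none := by
  have h : PySem.Str.strip (PySem.Str.join "\n" []) = "" := by decide
  simp [pvEmit, h]

theorem pvFlush_eq (sections : List (String × String)) (cur : String) (cc : List String) :
    (if cc ≠ [] then
        (let text := PySem.Str.strip (PySem.Str.join "\n" cc)
         if text ≠ "" then sections ++ [(cur, text)] else sections)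
      else sections)
    = sections ++ (pvEmit (cur, cc)).toList := by
  by_cases h : cc = []
  · subst h; simp [pvEmit_nil]
  · simp only [h, ne_eq, not_false_iff, if_true]
    by_cases ht : PySem.Str.strip (PySem.Str.join "\n" cc) = ""
    · simp [pvEmit, ht]
    · simp [pvEmit, ht]

theorem pvConsCC_cons (cc ls : List String) (n : String) (t : List (String × List String)) :
    pvConsCC cc ((n, ls) :: t) = (n, cc ++ ls) :: t := rfl

theorem pvConsCC_nil (segs : List (String × List String)) : pvConsCC [] segs = segs := by
  rcases segs with _ | ⟨⟨n, ls⟩, t⟩ <;> simp [pvConsCC]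

theorem pvSegments_cons_header (name l : String) (rest : List String)
    (h : pvIsHeader l = true) :
    pvSegments name (l :: rest) = (name, []) :: pvSegments (pvHeaderName l) rest := by
  have hf : (l :: rest).findIdx? pvIsHeader = some 0 := by
    simp [List.findIdx?_cons, h]
  rw [pvSegments]
  split
  · rename_i j heq
    rw [hf] at heq
    injection heq with hj
    subst hj
    simp
  · rename_i heq
    rw [hf] at heq
    exact absurd heq (by simp)

theorem pvSegments_cons_not_header (name l : String) (rest : List String)
    (h : pvIsHeader l = false) :
    pvSegments name (l :: rest) = pvConsCC [l] (pvSegments name rest) := by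
  have hf : (l :: rest).findIdx? pvIsHeader
      = (rest.findIdx? pvIsHeader).map (· + 1) := by
    simp [List.findIdx?_cons, h]
  rw [pvSegments]
  split
  · rename_i j heq
    rw [hf] at heq
    rcases hr : rest.findIdx? pvIsHeader with _ | j'
    · rw [hr] at heq; simp at heq
    · rw [hr] at heq
      simp only [Option.map_some] at heq
      injection heq with hj
      subst hj
      conv_rhs => rw [pvSegments]
      split
      · rename_i j2 heq2
        rw [hr] at heq2
        injection heq2 with hj2
        subst hj2
        simp [pvConsCC, List.take_succ_cons, List.getElem!_cons_succ, List.drop_succ_cons]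
      · rename_i heq2
        rw [hr] at heq2
        exact absurd heq2 (by simp)
  · rename_i heq
    rw [hf] at heq
    rcases hr : rest.findIdx? pvIsHeader with _ | j'
    · conv_rhs => rw [pvSegments]
      split
      · rename_i j2 heq2
        rw [hr] at heq2
        exact absurd heq2 (by simp)
      · simp [pvConsCC]
    · rw [hr] at heq; simp at heq

theorem pvConsCC_consCC (cc cc' : List String) (segs : List (String × List String)) :
    pvConsCC cc (pvConsCC cc' segs) = pvConsCC (cc ++ cc') segs := by
  rcases segs with _ | ⟨⟨n, ls⟩, t⟩ <;> simp [pvConsCC]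

theorem pvMain (lines : List String) : ∀ (secs : List (String × String)) (cur : String)
    (cc : List String),
    (let st := lines.foldl pvStepA (secs, cur, cc)
     st.1 ++ (pvEmit (st.2.1, st.2.2)).toList)
    = secs ++ List.filterMap pvEmit (pvConsCC cc (pvSegments cur lines)) := by
  induction lines with
  | nil =>
    intro secs cur cc
    rw [pvSegments]
    simp [List.findIdx?, pvConsCC, List.filterMap_cons]
    rcases h : pvEmit (cur, cc) with _ | v <;> simp [h]
  | cons l rest ih =>
    intro secs cur cc
    by_cases h : pvIsHeader l = true
    · have hs : pvStepA (secs, cur, cc) l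
          = (secs ++ (pvEmit (cur, cc)).toList, pvHeaderName l, []) := by
        simp only [pvStepA, h, if_true, pvFlush_eq]
      rw [List.foldl_cons, hs, pvSegments_cons_header _ _ _ h]
      have := ih (secs ++ (pvEmit (cur, cc)).toList) (pvHeaderName l) []
      simp only [this, pvConsCC_nil, pvConsCC_cons, List.append_nil, List.filterMap_cons]
      rcases he : pvEmit (cur, cc) with _ | v <;> simp [he]
    · have h' : pvIsHeader l = false := by simpa using h
      have hs : pvStepA (secs, cur, cc) l = (secs, cur, cc ++ [l]) := by
        simp [pvStepA, h']
      rw [List.foldl_cons, hs, pvSegments_cons_not_header _ _ _ h', pvConsCC_consCC]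
      exact ih secs cur (cc ++ [l])

-- ===== VERDICT (by name: the statement is the Claim_ definition above) =====
theorem split_document_by_sections_py_spec : Claim_equal_split_document_by_sections_py := by
  intro content _
  unfold Spec_split_document_by_sections_py split_document_by_sections_py split_document_by_sections_py_alt
  have := pvMain ((PySem.Str.split? content "\n").getD []) [] "Introduction" []
  simp only [pvFlush_eq]
  rcases hst : ((PySem.Str.split? content "\n").getD []).foldl pvStepA ([], "Introduction", [])
    with ⟨s, c, k⟩
  rw [hst] at this
  simp only at this
  have hcc : pvConsCC [] (pvSegments "Introduction" ((PySem.Str.split? content "\n").getD []))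
      = pvSegments "Introduction" ((PySem.Str.split? content "\n").getD []) := by
    rcases hseg : pvSegments "Introduction" ((PySem.Str.split? content "\n").getD [])
      with _ | ⟨⟨n, ls⟩, t⟩ <;> simp [pvConsCC]
  rw [hcc] at this
  simp only [List.nil_append] at this
  rw [this]
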